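-- pv_equiv track=rewrite | github.com/rahuljain2104/python | can_give_change.py | can_give_change
-- ===== SOURCE A (Python) =====
-- def can_give_change(arr):
--     reserve = 0
--     for i, note in enumerate(arr):
--         if note == 5:
--             reserve += 5
--             continue
--         else:
--             reserve -= (note-5)
--         if reserve < 0:
--             return i+1
--     return 0
-- ===== SOURCE B (Python) =====
-- def can_give_change(arr):
--     # Phase 1: prefix sums of each note's contribution (+5 for a 5-note, else 5-note)
--     sums = []
--     total = 0
--     for note in arr:
--         total += 5 if note == 5 else 5 - note
--         sums.append(total)
--     # Phase 2: first position where the running reserve is negative (1-indexed), else 0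
--     for i, s in enumerate(sums):
--         if s < 0:
--             return i + 1
--     return 0
-- ===== Notes on version B (the rewrite author's own statement) =====
-- stated objective: alternative
-- what changed: Replaces A's fused loop (running reserve with in-loop early return) by two phases: first build the list of prefix sums of per-note contributions, then scan it for the first negative value.
import Mathlib
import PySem

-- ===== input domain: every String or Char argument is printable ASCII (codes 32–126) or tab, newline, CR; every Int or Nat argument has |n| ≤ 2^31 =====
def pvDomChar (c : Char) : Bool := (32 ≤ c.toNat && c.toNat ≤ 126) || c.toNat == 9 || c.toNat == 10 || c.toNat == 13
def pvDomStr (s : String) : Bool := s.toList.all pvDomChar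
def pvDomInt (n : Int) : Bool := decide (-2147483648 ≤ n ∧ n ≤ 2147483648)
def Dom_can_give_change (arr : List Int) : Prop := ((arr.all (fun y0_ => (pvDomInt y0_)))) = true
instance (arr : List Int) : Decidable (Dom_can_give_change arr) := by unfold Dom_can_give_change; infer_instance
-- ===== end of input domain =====

-- B replaces A's fused running-reserve loop with two phases (build prefix sums, then find the first negative); objective: alternative decomposition.


-- ===== PORT A =====
-- A's loop: running reserve, early return i+1 on a negative reserve after a non-5 note.
def can_give_change_go (reserve : Int) (i : Nat) : List Int → Int
  | [] => 0
  | note :: rest =>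
    if note == 5 then
      can_give_change_go (reserve + 5) (i + 1) rest
    else
      let r := reserve - (note - 5)
      if r < 0 then (i : Int) + 1 else can_give_change_go r (i + 1) rest

def can_give_change (arr : List Int) : Int := can_give_change_go 0 0 arr

-- ===== PORT B =====
def cgc_contrib (note : Int) : Int := if note == 5 then 5 else 5 - note

-- Phase 1 of Source B: the list of prefix sums of contributions.
def cgc_prefix (total : Int) : List Int → List Int
  | [] => []
  | note :: rest =>
    let t := total + cgc_contrib note
    t :: cgc_prefix t rest

-- Phase 2 of Source B: first index (1-based) with a negative value, else 0.
def cgc_find (i : Nat) : List Int → Int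
  | [] => 0
  | s :: rest => if s < 0 then (i : Int) + 1 else cgc_find (i + 1) rest

def can_give_change_alt (arr : List Int) : Int := cgc_find 0 (cgc_prefix 0 arr)

-- ===== PRECONDITION & SPEC =====
def Spec_can_give_change (arr : List Int) (out : Int) : Prop := out = can_give_change_alt arr
instance (arr : List Int) (out : Int) : Decidable (Spec_can_give_change arr out) := by unfold Spec_can_give_change; infer_instance

-- ===== CLAIM (what is proved, stated in full; the proofs are below) =====
def Claim_equal_can_give_change : Prop := ∀ (arr : List Int), Dom_can_give_change arr → Spec_can_give_change arr (can_give_change arr)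

-- ===== LEMMAS AND PROOFS =====
-- Invariant: with a nonnegative reserve, A's fused loop equals B's find over B's prefix sums.
lemma cgc_go_eq_find (arr : List Int) : ∀ (reserve : Int) (i : Nat), 0 ≤ reserve →
    can_give_change_go reserve i arr = cgc_find i (cgc_prefix reserve arr) := by
  induction arr with
  | nil => intro reserve i _; rfl
  | cons note rest ih =>
    intro reserve i hres
    by_cases h5 : note = 5
    · subst h5
      simp only [can_give_change_go, cgc_prefix, cgc_contrib, cgc_find]
      have hnn : ¬ reserve + 5 < 0 := by omega
      simp only [beq_self_eq_true, if_true, if_neg hnn]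
      exact ih (reserve + 5) (i + 1) (by omega)
    · have hb : (note == 5) = false := by simp [h5]
      simp only [can_give_change_go, cgc_prefix, cgc_contrib, cgc_find, hb, if_false,
        Bool.false_eq_true]
      have harith : reserve - (note - 5) = reserve + (5 - note) := by ring
      by_cases hneg : reserve - (note - 5) < 0
      · rw [if_pos hneg, if_pos (by omega : reserve + (5 - note) < 0)]
      · rw [if_neg hneg, if_neg (by omega : ¬ reserve + (5 - note) < 0), harith]
        exact ih _ (i + 1) (by omega)

-- ===== VERDICT (by name: the statement is the Claim_ definition above) =====
theorem can_give_change_spec : Claim_equal_can_give_change := by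
  intro arr _
  unfold Spec_can_give_change can_give_change can_give_change_alt
  exact cgc_go_eq_find arr 0 0 le_rfl
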